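-- pv_equiv track=rewrite | github.com/IBM/debater-eap-tutorial | austin/austin_utils.py | split_sentence_to_lines
-- ===== SOURCE A (Python) =====
-- def split_sentence_to_lines(sentence, max_len):
--     if len(sentence) <= max_len:
--         return ['- ' + sentence]
--
--     lines = []
--     line = None
--     tokens = sentence.split(' ')
--     for token in tokens:
--         if line is None:
--             line = '- ' + token
--         else:
--             if len(line + ' ' + token) <= max_len:
--                 line += ' ' + token
--             else:
--                 lines.append(line)
--                 line = '  ' + token
--     if line is not None:
--         lines.append(line)
--     return lines
-- ===== SOURCE B (Python) =====
-- def split_sentence_to_lines(sentence, max_len):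
--     if len(sentence) <= max_len:
--         return ['- ' + sentence]
--     # peel one line at a time: each line takes the next word unconditionally,
--     # then an inner scan extends it while further words still fit
--     words = sentence.split(' ')
--     n = len(words)
--     lines = []
--     i = 0
--     while i < n:
--         width = 2 + len(words[i])
--         j = i + 1
--         while j < n and width + 1 + len(words[j]) <= max_len:
--             width += 1 + len(words[j])
--             j += 1
--         lines.append(('- ' if i == 0 else '  ') + ' '.join(words[i:j]))
--         i = j
--     return lines
-- ===== Notes on version B (the rewrite author's own statement) =====
-- stated objective: alternative
-- what changed: A makes a single pass over the tokens maintaining a growing current-line string and emitting it when the next token no longer fits; B peels one whole line per step: an outer loop per line whose inner scan finds, by width arithmetic, how many following words fit after the mandatory first word, then renders words[i:j] with its prefix in one join.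
import Mathlib
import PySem

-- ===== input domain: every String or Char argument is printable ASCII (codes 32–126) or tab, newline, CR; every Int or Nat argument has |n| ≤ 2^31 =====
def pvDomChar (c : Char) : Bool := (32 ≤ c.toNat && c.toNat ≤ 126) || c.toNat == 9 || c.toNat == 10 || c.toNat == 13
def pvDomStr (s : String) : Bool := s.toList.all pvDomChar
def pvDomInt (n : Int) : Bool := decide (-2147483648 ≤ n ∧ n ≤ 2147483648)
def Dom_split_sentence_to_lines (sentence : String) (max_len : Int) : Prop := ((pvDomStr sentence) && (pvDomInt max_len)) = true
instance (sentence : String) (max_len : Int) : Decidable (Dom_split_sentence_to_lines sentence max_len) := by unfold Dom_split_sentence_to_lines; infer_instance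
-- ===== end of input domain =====

-- B replaces A's single token pass with a current-line accumulator by a per-line outer loop:
-- each step peels one whole line (mandatory first word + inner fit scan) and renders it ("alternative", same cost).

-- ===== PORT A =====
-- the for-loop of A, over the same state (lines, line : Option line)
def pvALoop (ml : Int) (st : List (List Char) × Option (List Char)) :
    List (List Char) → List (List Char) × Option (List Char)
  | [] => st
  | t :: ts =>
    pvALoop ml
      (match st.2 with
       | none => (st.1, some ('-' :: ' ' :: t))
       | some line =>
         if PySem.Chars.len (line ++ ' ' :: t) ≤ ml then (st.1, some (line ++ ' ' :: t))
         else (st.1 ++ [line], some (' ' :: ' ' :: t))) ts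

def split_sentence_to_lines (sentence : String) (max_len : Int) : List String :=
  if PySem.Str.len sentence ≤ max_len then [String.mk ('-' :: ' ' :: sentence.toList)]
  else
    (match pvALoop max_len ([], none) (PySem.Chars.splitOn sentence.toList [' ']) with
     | (lines, none) => lines
     | (lines, some line) => lines ++ [line]).map String.mk

-- ===== PORT B =====
-- B's inner while: consume leading words while they still fit after the current width;
-- returns (words taken, remaining words)
def pvTake (ml : Int) : List (List Char) → Int → List (List Char) × List (List Char)
  | [], _ => ([], [])
  | w :: ws, width =>
    if width + 1 + PySem.Chars.len w ≤ ml then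
      let p := pvTake ml ws (width + 1 + PySem.Chars.len w)
      (w :: p.1, p.2)
    else ([], w :: ws)

-- needed by pvPeel's decreasing_by: pvTake returns a suffix of its input
theorem pvTake_rest_len (ml : Int) :
    ∀ (ws : List (List Char)) (width : Int), (pvTake ml ws width).2.length ≤ ws.length := by
  intro ws
  induction ws with
  | nil => intro width; simp [pvTake]
  | cons w ws ih =>
    intro width
    rw [pvTake]
    split
    · exact le_trans (ih _) (by simp)
    · simp

-- B's outer while: peel one rendered line per step (first = "is this the first line")
def pvPeel (ml : Int) : List (List Char) → Bool → List (List Char)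
  | [], _ => []
  | w :: ws, first =>
    ((if first then ['-', ' '] else [' ', ' '])
        ++ PySem.Chars.join [' '] (w :: (pvTake ml ws (2 + PySem.Chars.len w)).1))
      :: pvPeel ml (pvTake ml ws (2 + PySem.Chars.len w)).2 false
termination_by l _ => l.length
decreasing_by
  simpa using Nat.lt_succ_of_le (pvTake_rest_len ml ws (2 + PySem.Chars.len w))

def split_sentence_to_lines_alt (sentence : String) (max_len : Int) : List String :=
  if PySem.Str.len sentence ≤ max_len then [String.mk ('-' :: ' ' :: sentence.toList)]
  else
    (pvPeel max_len (PySem.Chars.splitOn sentence.toList [' ']) true).map String.mk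

-- ===== PRECONDITION & SPEC =====
def Spec_split_sentence_to_lines (sentence : String) (max_len : Int) (out : List String) : Prop := out = split_sentence_to_lines_alt sentence max_len
instance (sentence : String) (max_len : Int) (out : List String) : Decidable (Spec_split_sentence_to_lines sentence max_len out) := by unfold Spec_split_sentence_to_lines; infer_instance

-- ===== CLAIM =====
def Claim_equal_split_sentence_to_lines : Prop := ∀ (sentence : String) (max_len : Int), Dom_split_sentence_to_lines sentence max_len → Spec_split_sentence_to_lines sentence max_len (split_sentence_to_lines sentence max_len)

-- ===== LEMMAS AND PROOFS =====

-- ' ' ++ w for each word (the tail of a space-join)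
def pvSpJoin (ws : List (List Char)) : List Char := ws.flatMap (fun w => ' ' :: w)

theorem pvJoin_cons (w : List Char) (ws : List (List Char)) :
    PySem.Chars.join [' '] (w :: ws) = w ++ pvSpJoin ws := by
  induction ws generalizing w with
  | nil => simp [PySem.Chars.join_singleton, pvSpJoin]
  | cons v vs ih =>
    rw [PySem.Chars.join_cons_cons, ih]
    simp [pvSpJoin]

theorem pvSplitOn_go_ne_nil (sep : List Char) :
    ∀ (fuel : Nat) (l cur : List Char) (acc : List (List Char)),
      PySem.Chars.splitOn.go sep fuel l cur acc ≠ [] := by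
  intro fuel
  induction fuel with
  | zero => intro l cur acc; simp [PySem.Chars.splitOn.go]
  | succ n ih =>
    intro l cur acc
    cases l with
    | nil => simp [PySem.Chars.splitOn.go]
    | cons c rest =>
      rw [PySem.Chars.splitOn.go]
      split
      · exact ih _ _ _
      · exact ih _ _ _

theorem pvSplitOn_ne_nil (s sep : List Char) : PySem.Chars.splitOn s sep ≠ [] := by
  unfold PySem.Chars.splitOn
  exact pvSplitOn_go_ne_nil sep _ _ _ _

-- equation lemmas for the well-founded pvPeel
theorem pvPeel_nil (ml : Int) (b : Bool) : pvPeel ml [] b = [] := by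
  rw [pvPeel.eq_def]

theorem pvPeel_cons (ml : Int) (w : List Char) (ws : List (List Char)) (first : Bool) :
    pvPeel ml (w :: ws) first
      = ((if first then ['-', ' '] else [' ', ' '])
            ++ PySem.Chars.join [' '] (w :: (pvTake ml ws (2 + PySem.Chars.len w)).1))
          :: pvPeel ml (pvTake ml ws (2 + PySem.Chars.len w)).2 false := by
  rw [pvPeel.eq_def]

-- main correspondence: flushing A's loop equals one peeled line plus the peel of the rest
theorem pvLoopEqPeel (ml : Int) :
    ∀ (ts : List (List Char)) (line : List Char) (lines : List (List Char)),
      (match pvALoop ml (lines, some line) ts with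
       | (ls, none) => ls
       | (ls, some l) => ls ++ [l])
      = lines ++ (line ++ pvSpJoin (pvTake ml ts (PySem.Chars.len line)).1)
          :: pvPeel ml (pvTake ml ts (PySem.Chars.len line)).2 false := by
  intro ts
  induction ts with
  | nil =>
    intro line lines
    simp [pvALoop, pvTake, pvPeel_nil, pvSpJoin]
  | cons t ts ih =>
    intro line lines
    rw [pvALoop, pvTake]
    have hlen : PySem.Chars.len (line ++ ' ' :: t) = PySem.Chars.len line + 1 + PySem.Chars.len t := by
      simp [PySem.Chars.len_eq]; ring
    simp only [hlen]
    by_cases h : PySem.Chars.len line + 1 + PySem.Chars.len t ≤ ml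
    · simp only [if_pos h]
      have hih := ih (line ++ ' ' :: t) lines
      rw [hlen] at hih
      rw [hih]
      simp [pvSpJoin]
    · simp only [if_neg h]
      have hih := ih (' ' :: ' ' :: t) (lines ++ [line])
      have hlen2 : PySem.Chars.len (' ' :: ' ' :: t) = 2 + PySem.Chars.len t := by
        simp [PySem.Chars.len_eq]; ring
      rw [hlen2] at hih
      rw [hih, pvPeel_cons]
      simp [pvJoin_cons, pvSpJoin]

-- ===== VERDICT =====
theorem split_sentence_to_lines_spec : Claim_equal_split_sentence_to_lines := by
  intro sentence max_len _
  unfold Spec_split_sentence_to_lines split_sentence_to_lines split_sentence_to_lines_alt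
  by_cases h : PySem.Str.len sentence ≤ max_len
  · rw [if_pos h, if_pos h]
  · rw [if_neg h, if_neg h]
    obtain ⟨t, ts, hts⟩ :
        ∃ t ts, PySem.Chars.splitOn sentence.toList [' '] = t :: ts := by
      cases hsp : PySem.Chars.splitOn sentence.toList [' '] with
      | nil => exact absurd hsp (pvSplitOn_ne_nil _ _)
      | cons a l => exact ⟨a, l, rfl⟩
    rw [hts]
    have hstart : pvALoop max_len ([], none) (t :: ts)
        = pvALoop max_len ([], some ('-' :: ' ' :: t)) ts := by
      rw [pvALoop]
    rw [hstart]
    have hmain := pvLoopEqPeel max_len ts ('-' :: ' ' :: t) []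
    have hlen : PySem.Chars.len ('-' :: ' ' :: t) = 2 + PySem.Chars.len t := by
      simp [PySem.Chars.len_eq]; ring
    rw [hlen] at hmain
    rw [hmain, pvPeel_cons]
    simp [pvJoin_cons]
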